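-- pv_equiv track=rewrite | github.com/cjy0112/Leetcode | 0001~0500/238. Product of Array Except Self/Best Memory.py | get_0_count_and_mult
-- ===== SOURCE A (Python) =====
-- def get_0_count_and_mult(nums):
--     mult = 1
--     zero_count = 0
--     for e in nums:
--         if e==0:
--             zero_count += 1
--         else:
--             mult *= e
--
--     return mult, zero_count
-- ===== SOURCE B (Python) =====
-- def get_0_count_and_mult(nums):
--     nonzero = [e for e in nums if e != 0]
--     mult = 1
--     for e in nonzero:
--         mult *= e
--     return mult, nums.count(0)
-- ===== Notes on version B (the rewrite author's own statement) =====
-- stated objective: simpler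
-- what changed: Replaces the fused single loop maintaining two accumulators by two independent passes: the zero count via list.count(0) and the product of a filtered non-zero list.
import Mathlib
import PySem

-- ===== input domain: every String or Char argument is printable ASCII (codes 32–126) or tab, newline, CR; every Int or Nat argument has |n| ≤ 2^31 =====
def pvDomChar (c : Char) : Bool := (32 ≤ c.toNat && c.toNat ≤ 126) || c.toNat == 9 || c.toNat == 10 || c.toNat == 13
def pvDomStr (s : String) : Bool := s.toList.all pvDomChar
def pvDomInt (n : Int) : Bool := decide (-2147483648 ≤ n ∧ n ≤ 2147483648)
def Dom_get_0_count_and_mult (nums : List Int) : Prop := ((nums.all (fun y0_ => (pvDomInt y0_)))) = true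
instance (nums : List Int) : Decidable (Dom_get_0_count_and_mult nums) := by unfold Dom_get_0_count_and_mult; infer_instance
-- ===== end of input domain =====

-- ===== PORT A =====
-- B replaces A's fused loop with two independent passes (count 0, then product of the filtered non-zero list); equal cost, simpler decomposition.
def get_0_count_and_mult (nums : List Int) : Int × Int :=
  nums.foldl (fun (s : Int × Int) e => if e == 0 then (s.1, s.2 + 1) else (s.1 * e, s.2)) (1, 0)

-- ===== PORT B =====
def get_0_count_and_mult_alt (nums : List Int) : Int × Int :=
  let nonzero := nums.filter (fun e => e != 0)
  (nonzero.foldl (fun m e => m * e) 1, (PySem.List.count nums 0 : Int))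

-- ===== PRECONDITION & SPEC =====
def Spec_get_0_count_and_mult (nums : List Int) (out : Int × Int) : Prop := out = get_0_count_and_mult_alt nums
instance (nums : List Int) (out : Int × Int) : Decidable (Spec_get_0_count_and_mult nums out) := by unfold Spec_get_0_count_and_mult; infer_instance

-- ===== CLAIM (what is proved, stated in full; the proofs are below) =====
def Claim_equal_get_0_count_and_mult : Prop := ∀ (nums : List Int), Dom_get_0_count_and_mult nums → Spec_get_0_count_and_mult nums (get_0_count_and_mult nums)

-- ===== LEMMAS AND PROOFS =====

-- ===== VERDICT (by name: the statement is the Claim_ definition above) =====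
theorem fused_foldl_eq (nums : List Int) (m z : Int) :
    nums.foldl (fun (s : Int × Int) e => if e == 0 then (s.1, s.2 + 1) else (s.1 * e, s.2)) (m, z)
      = (((nums.filter (fun e => e != 0)).foldl (fun a e => a * e) m),
         z + (nums.count 0 : Int)) := by
  induction nums generalizing m z with
  | nil => simp
  | cons x xs ih =>
    by_cases hx : x = 0
    · subst hx
      simp only [List.foldl_cons, List.filter_cons, List.count_cons, beq_self_eq_true,
        bne_self_eq_false, if_true, if_false, Bool.false_eq_true]
      rw [ih m (z + 1)]
      push_cast
      ring_nf
    · simpa [List.foldl_cons, List.filter_cons, List.count_cons, hx] using ih (m * x) z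

theorem get_0_count_and_mult_spec : Claim_equal_get_0_count_and_mult := by
  intro nums _
  unfold Spec_get_0_count_and_mult get_0_count_and_mult get_0_count_and_mult_alt
  rw [fused_foldl_eq]
  simp [PySem.List.count]
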